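-- pv_equiv track=rewrite | github.com/yaodang/GASV | INIT/read_wrpFile.py | processFlag
-- ===== SOURCE A (Python) =====
-- def processFlag(lines):
--
--     flag = 0
--     step = []
--     for line in lines:
--         if 'Begin Process' in line:
--             step.append(line)
--
--     for line in step:
--         if 'nuSolve' in line or 'VIPSSolve' in line:
--             flag = 2
--         if 'db2vgosDB' in line:
--             flag = 3
--
--     if flag < 2:
--         if 'vgosDbMake' in step[-1] or 'vgosDbCalc' in step[-1] or \
--                 'vgosDbProcLogs' in step[-1] or 'vgosDbPlog' in step[-1] or \
--                 'makedb' in step[-1]: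
--             flag = 1
--     '''
--     if 'vgosDbMake' in step[-1] or 'vgosDbCalc' in step[-1] or \
--        'vgosDbProcLogs' in step[-1] or 'vgosDbPlog' in step[-1] or \
--        'makedb' in step[-1]:
--         flag = 1
--     if 'nuSolve' in step[-1] or 'VIPSSolve' in step[-1]:
--         flag = 2
--     if  'db2vgosDB' in step[-1]:
--         flag = 3
--     '''
--     return flag
-- ===== SOURCE B (Python) =====
-- def processFlag(lines):
--     last = None
--     for line in reversed(lines):
--         if 'Begin Process' in line:
--             if last is None:
--                 last = line
--             if 'db2vgosDB' in line:
--                 return 3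
--             if 'nuSolve' in line or 'VIPSSolve' in line:
--                 return 2
--     if 'vgosDbMake' in last or 'vgosDbCalc' in last or \
--             'vgosDbProcLogs' in last or 'vgosDbPlog' in last or \
--             'makedb' in last:
--         return 1
--     return 0
-- ===== Notes on version B (the rewrite author's own statement) =====
-- stated objective: alternative
-- what changed: Replaced A's two passes (build the step list, then a forward overwrite loop plus a step[-1] test) by a single reverse scan over lines with early return and O(1) extra state (no step list).
import Mathlib
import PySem

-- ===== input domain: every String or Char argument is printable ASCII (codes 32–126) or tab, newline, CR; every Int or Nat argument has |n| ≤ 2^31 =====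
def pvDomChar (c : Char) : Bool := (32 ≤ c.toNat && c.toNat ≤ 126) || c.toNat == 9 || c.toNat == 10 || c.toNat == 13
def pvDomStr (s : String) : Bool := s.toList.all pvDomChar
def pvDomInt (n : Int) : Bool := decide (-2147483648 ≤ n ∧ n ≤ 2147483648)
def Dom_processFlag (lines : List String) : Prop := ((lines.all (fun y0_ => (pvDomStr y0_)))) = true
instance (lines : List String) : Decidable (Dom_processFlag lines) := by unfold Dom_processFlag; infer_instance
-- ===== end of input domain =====

-- B replaces A's two passes (build `step`, then a forward overwrite loop plus a step[-1] check)
-- by one reverse scan over `lines` with early return and O(1) extra state (objective: alternative;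
-- return values proved equal on Pre_; both Pythons raise when no line contains 'Begin Process').

-- ===== PORT A =====
-- the five flag-1 substrings tested on step[-1]
def pvOne (l : String) : Bool :=
  PySem.Str.isIn "vgosDbMake" l || PySem.Str.isIn "vgosDbCalc" l ||
  PySem.Str.isIn "vgosDbProcLogs" l || PySem.Str.isIn "vgosDbPlog" l ||
  PySem.Str.isIn "makedb" l

def processFlag (lines : List String) : Int :=
  let step := lines.foldl
    (fun acc line => if PySem.Str.isIn "Begin Process" line then acc ++ [line] else acc) []
  let flag : Int := step.foldl
    (fun flag line =>
      let flag := if PySem.Str.isIn "nuSolve" line || PySem.Str.isIn "VIPSSolve" line then 2 else flag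
      if PySem.Str.isIn "db2vgosDB" line then 3 else flag) 0
  if flag < 2 then
    match PySem.List.pyGet? step (-1) with
    | none => flag      -- Python raises IndexError here; excluded by Pre_processFlag
    | some last => if pvOne last then 1 else flag
  else flag

-- ===== PORT B =====
def pvOneB (l : String) : Bool :=
  PySem.Str.isIn "vgosDbMake" l || PySem.Str.isIn "vgosDbCalc" l ||
  PySem.Str.isIn "vgosDbProcLogs" l || PySem.Str.isIn "vgosDbPlog" l ||
  PySem.Str.isIn "makedb" l

-- reverse scan of Source B: `last` holds the first 'Begin Process' line seen (i.e. the last in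
-- original order); early return 3/2; at the end the step[-1] test on `last`.
def pfLoop : List String → Option String → Int
  | [], last =>
    match last with
    | none => 0         -- Python raises TypeError ('in None') here; excluded by Pre_processFlag
    | some l => if pvOneB l then 1 else 0
  | line :: rest, last =>
    if PySem.Str.isIn "Begin Process" line then
      let last := if last.isNone then some line else last
      if PySem.Str.isIn "db2vgosDB" line then 3
      else if PySem.Str.isIn "nuSolve" line || PySem.Str.isIn "VIPSSolve" line then 2
      else pfLoop rest last
    else pfLoop rest last

def processFlag_alt (lines : List String) : Int :=
  pfLoop lines.reverse none

-- ===== PRECONDITION & SPEC =====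
-- Pre_ excludes exactly the inputs with no line containing 'Begin Process': there A raises
-- IndexError on step[-1] (and B raises TypeError), so neither returns a value.
def Pre_processFlag (lines : List String) : Prop :=
  ∃ line ∈ lines, PySem.Str.isIn "Begin Process" line = true
instance (lines : List String) : Decidable (Pre_processFlag lines) := by
  unfold Pre_processFlag; infer_instance

def pvWitness_processFlag : List String := ["Begin Process nuSolve"]

def Spec_processFlag (lines : List String) (out : Int) : Prop := out = processFlag_alt lines
instance (lines : List String) (out : Int) : Decidable (Spec_processFlag lines out) := by
  unfold Spec_processFlag; infer_instance

-- ===== CLAIM (what is proved, stated in full; the proofs are below) =====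
def Claim_equal_processFlag : Prop :=
  ∀ (lines : List String), Dom_processFlag lines → Pre_processFlag lines →
    Spec_processFlag lines (processFlag lines)

-- ===== LEMMAS AND PROOFS =====
-- abbreviations used only in the proofs
def pvP (l : String) : Bool := PySem.Str.isIn "Begin Process" l
def pvD (l : String) : Bool := PySem.Str.isIn "db2vgosDB" l
def pvQ (l : String) : Bool := PySem.Str.isIn "nuSolve" l || PySem.Str.isIn "VIPSSolve" l
def pvF (flag : Int) (line : String) : Int :=
  let flag := if pvQ line then 2 else flag
  if pvD line then 3 else flag
-- pfLoop restricted to the lines that pass the 'Begin Process' filter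
def pfScan : List String → Option String → Int
  | [], last =>
    match last with
    | none => 0
    | some l => if pvOneB l then 1 else 0
  | line :: rest, last =>
    let last := if last.isNone then some line else last
    if pvD line then 3
    else if pvQ line then 2
    else pfScan rest last

theorem pfLoop_eq_pfScan (xs : List String) (last : Option String) :
    pfLoop xs last = pfScan (xs.filter pvP) last := by
  induction xs generalizing last with
  | nil => rfl
  | cons x rest ih =>
    rw [List.filter_cons]
    by_cases h : pvP x
    · rw [if_pos h]
      have h' : PySem.Str.isIn "Begin Process" x = true := h
      simp only [pfLoop, pfScan, h', if_true, ih]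
      rfl
    · rw [if_neg h]
      have h' : PySem.Str.isIn "Begin Process" x = false := by
        simpa [pvP] using h
      simp only [pfLoop, h', Bool.false_eq_true, if_false, ih]

theorem pyGet?_neg_one_eq_getLast? (xs : List String) :
    PySem.List.pyGet? xs (-1) = xs.getLast? := by
  cases xs with
  | nil => rfl
  | cons x rest =>
    simp [PySem.List.pyGet?, PySem.List.pyIdx?]
    simp [List.getLast?_eq_getElem?]

-- the foldl flag on s followed by the step[-1] test, as one function of the step list
def pvAval (s : List String) : Int :=
  let flag := s.foldl pvF 0
  if flag < 2 then
    match s.getLast? with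
    | none => flag
    | some l => if pvOne l then 1 else flag
  else flag

-- pfScan with `last` already set: the tail test always uses that l
theorem pfScan_some (s : List String) (l : String) :
    pfScan s.reverse (some l) =
      (let flag := s.foldl pvF 0
       if flag < 2 then (if pvOne l then 1 else flag) else flag) := by
  induction s using List.reverseRecOn with
  | nil => simp [pfScan]; rfl
  | append_singleton s' x ih =>
    rw [List.reverse_append]
    by_cases hd : pvD x
    · simp [pfScan, hd, pvF]
    · by_cases hq : pvQ x
      · simp [pfScan, hd, hq, pvF]
      · simp [pfScan, hd, hq, ih, pvF]

theorem pfScan_eq_pvAval (s : List String) :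
    pfScan s.reverse none = pvAval s := by
  induction s using List.reverseRecOn with
  | nil => rfl
  | append_singleton s' x ih =>
    rw [List.reverse_append]
    by_cases hd : pvD x
    · simp [pfScan, hd, pvAval, pvF]
    · by_cases hq : pvQ x
      · simp [pfScan, hd, hq, pvAval, pvF]
      · simp [pfScan, hd, hq, pfScan_some, pvAval, pvF]

theorem processFlag_eq_pvAval (lines : List String) :
    processFlag lines = pvAval (lines.filter pvP) := by
  simp only [processFlag, pvAval, PySem.List.foldl_append_if_eq_filter, List.nil_append,
    pyGet?_neg_one_eq_getLast?]
  rfl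

-- ===== VERDICT (by name: the statement is the Claim_ definition above) =====
theorem processFlag_spec : Claim_equal_processFlag := by
  intro lines _ _
  unfold Spec_processFlag processFlag_alt
  rw [pfLoop_eq_pfScan, List.filter_reverse, pfScan_eq_pvAval, processFlag_eq_pvAval]
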